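-- pv_equiv track=rewrite | github.com/arthurD96/Dissertation | PathOperators.py | alternatingPositionCrossover
-- ===== SOURCE A (Python) =====
-- def alternatingPositionCrossover(numberOfCities, parentOne, parentTwo):
--     parentListOne = []
--     parentListTwo = []
--     for j in range(numberOfCities):
--         parentListOne.append(parentOne[j])
--         parentListOne.append(parentTwo[j])
--         parentListTwo.append(parentTwo[j])
--         parentListTwo.append(parentOne[j])
--     childOne = []
--     childTwo = []
--     children = [childOne, childTwo]
--     for city in range(len(parentListOne)):
--         if parentListOne[city] not in childOne:
--             childOne.append(parentListOne[city])
--         if parentListTwo[city] not in childTwo: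
--             childTwo.append(parentListTwo[city])
--     return children
-- ===== SOURCE B (Python) =====
-- def alternatingPositionCrossover(numberOfCities, parentOne, parentTwo):
--     # Filter-based dedup (nub): repeatedly take the head, strip all its later
--     # occurrences from the rest.  No 'seen' structure and no membership scan
--     # of the growing child list.
--     def nub(xs):
--         out = []
--         while xs:
--             head = xs[0]
--             out.append(head)
--             xs = [x for x in xs[1:] if x != head]
--         return out
--
--     merged = [v for j in range(numberOfCities) for v in (parentOne[j], parentTwo[j])]
--     swapped = [v for j in range(numberOfCities) for v in (parentTwo[j], parentOne[j])]
--     return [nub(merged), nub(swapped)]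
-- ===== Notes on version B (the rewrite author's own statement) =====
-- stated objective: alternative
-- what changed: B replaces A's build-then-index-dedup loops (membership scan of the growing child list) by a recursive filter-based nub: take the head of the interleaved list, strip its later occurrences from the tail, recurse; no child-membership scan and no index loop.
import Mathlib
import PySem

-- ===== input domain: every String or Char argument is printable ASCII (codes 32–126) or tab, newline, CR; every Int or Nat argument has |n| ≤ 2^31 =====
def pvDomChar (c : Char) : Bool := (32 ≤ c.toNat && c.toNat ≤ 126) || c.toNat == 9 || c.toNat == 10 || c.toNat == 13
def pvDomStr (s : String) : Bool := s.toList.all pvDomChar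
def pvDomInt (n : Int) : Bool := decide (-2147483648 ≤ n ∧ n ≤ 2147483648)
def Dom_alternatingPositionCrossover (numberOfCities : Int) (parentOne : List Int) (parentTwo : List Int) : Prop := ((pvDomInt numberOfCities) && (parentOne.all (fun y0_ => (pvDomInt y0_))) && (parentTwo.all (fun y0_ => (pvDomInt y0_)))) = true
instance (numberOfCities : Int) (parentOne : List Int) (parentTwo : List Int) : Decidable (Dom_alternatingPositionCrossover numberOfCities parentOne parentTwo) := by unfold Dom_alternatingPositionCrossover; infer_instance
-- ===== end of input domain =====

-- B replaces A's build-then-index-dedup loops by a recursive filter-based nub of the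
-- interleaved lists; same cost class, a different decomposition (objective: alternative).

-- ===== PORT A =====
def alternatingPositionCrossover (numberOfCities : Int) (parentOne : List Int) (parentTwo : List Int) : List (List Int) :=
  -- first loop: build the two interleaved parent lists
  let pls := (PySem.List.pyRange 0 numberOfCities 1).foldl
    (fun (s : List Int × List Int) j =>
      (s.1 ++ [PySem.List.pyGetD parentOne j 0, PySem.List.pyGetD parentTwo j 0],
       s.2 ++ [PySem.List.pyGetD parentTwo j 0, PySem.List.pyGetD parentOne j 0]))
    ([], [])
  -- second loop: dedup each interleaved list by index, guarded by a membership scan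
  let cs := (PySem.List.pyRange 0 (PySem.List.len pls.1) 1).foldl
    (fun (c : List Int × List Int) city =>
      (if (PySem.List.pyGetD pls.1 city 0) ∈ c.1 then c.1 else c.1 ++ [PySem.List.pyGetD pls.1 city 0],
       if (PySem.List.pyGetD pls.2 city 0) ∈ c.2 then c.2 else c.2 ++ [PySem.List.pyGetD pls.2 city 0]))
    ([], [])
  [cs.1, cs.2]

-- ===== PORT B =====
-- B's nub loop: append the head to out, strip all its copies from the rest, repeat
def apxNubGo (out : List Int) : List Int → List Int
  | [] => out
  | x :: t => apxNubGo (out ++ [x]) (t.filter (fun y => y ≠ x))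
termination_by xs => xs.length
decreasing_by
  simp only [List.length_cons, Nat.lt_succ_iff]
  have h := List.length_filter_le (fun (z : {y // y ∈ t}) => decide ((z : Int) ≠ x)) t.attach
  simpa using h

def alternatingPositionCrossover_alt (numberOfCities : Int) (parentOne : List Int) (parentTwo : List Int) : List (List Int) :=
  let merged := (PySem.List.pyRange 0 numberOfCities 1).flatMap
    (fun j => [PySem.List.pyGetD parentOne j 0, PySem.List.pyGetD parentTwo j 0])
  let swapped := (PySem.List.pyRange 0 numberOfCities 1).flatMap
    (fun j => [PySem.List.pyGetD parentTwo j 0, PySem.List.pyGetD parentOne j 0])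
  [apxNubGo [] merged, apxNubGo [] swapped]

-- ===== PRECONDITION & SPEC =====
-- Pre_ excludes exactly the inputs where Python A raises IndexError: numberOfCities exceeds
-- the length of parentOne or parentTwo (B raises there too).
def Pre_alternatingPositionCrossover (numberOfCities : Int) (parentOne : List Int) (parentTwo : List Int) : Prop :=
  numberOfCities ≤ (parentOne.length : Int) ∧ numberOfCities ≤ (parentTwo.length : Int)
instance (numberOfCities : Int) (parentOne : List Int) (parentTwo : List Int) : Decidable (Pre_alternatingPositionCrossover numberOfCities parentOne parentTwo) := by unfold Pre_alternatingPositionCrossover; infer_instance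
def pvWitness_alternatingPositionCrossover : Int × List Int × List Int := (3, [1, 2, 3], [3, 1, 2])

def Spec_alternatingPositionCrossover (numberOfCities : Int) (parentOne : List Int) (parentTwo : List Int) (out : List (List Int)) : Prop := out = alternatingPositionCrossover_alt numberOfCities parentOne parentTwo
instance (numberOfCities : Int) (parentOne : List Int) (parentTwo : List Int) (out : List (List Int)) : Decidable (Spec_alternatingPositionCrossover numberOfCities parentOne parentTwo out) := by unfold Spec_alternatingPositionCrossover; infer_instance

-- ===== CLAIM (what is proved, stated in full; the proofs are below) =====
def Claim_equal_alternatingPositionCrossover : Prop := ∀ (numberOfCities : Int) (parentOne : List Int) (parentTwo : List Int), Dom_alternatingPositionCrossover numberOfCities parentOne parentTwo → Pre_alternatingPositionCrossover numberOfCities parentOne parentTwo → Spec_alternatingPositionCrossover numberOfCities parentOne parentTwo (alternatingPositionCrossover numberOfCities parentOne parentTwo)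

-- ===== LEMMAS AND PROOFS =====

-- proof-side recursive form of B's nub loop
def apxNub : List Int → List Int
  | [] => []
  | x :: t => x :: apxNub (t.filter (fun y => y ≠ x))
termination_by xs => xs.length
decreasing_by
  simp only [List.length_cons, Nat.lt_succ_iff]
  have h := List.length_filter_le (fun (z : {y // y ∈ t}) => decide ((z : Int) ≠ x)) t.attach
  simpa using h

-- equation lemmas for the well-founded recursion apxNub
lemma apxNub_nil : apxNub [] = [] := by simp [apxNub]
lemma apxNub_cons (x : Int) (t : List Int) :
    apxNub (x :: t) = x :: apxNub (t.filter (fun y => y ≠ x)) := by rw [apxNub.eq_def]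

-- B's accumulator loop is apxNub appended to the accumulator
lemma apxNubGo_eq_aux : ∀ (n : Nat) (xs : List Int), xs.length ≤ n →
    ∀ out : List Int, apxNubGo out xs = out ++ apxNub xs := by
  intro n
  induction n with
  | zero =>
      intro xs h out
      cases xs with
      | nil => simp [apxNubGo, apxNub_nil]
      | cons x t => simp at h
  | succ n ih =>
      intro xs h out
      cases xs with
      | nil => simp [apxNubGo, apxNub_nil]
      | cons x t =>
          rw [show apxNubGo out (x :: t) = apxNubGo (out ++ [x]) (t.filter (fun y => y ≠ x)) from by
                rw [apxNubGo.eq_def],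
              apxNub_cons,
              ih _ (le_trans (List.length_filter_le _ _) (Nat.le_of_succ_le_succ (by simpa using h)))]
          simp

lemma apxNubGo_eq (xs : List Int) (out : List Int) : apxNubGo out xs = out ++ apxNub xs :=
  apxNubGo_eq_aux xs.length xs le_rfl out


-- the deduplicating insertion A's second loop performs elementwise
def apxIns (c : List Int) (x : Int) : List Int := if x ∈ c then c else c ++ [x]

-- A's accumulator fold equals the filter-based nub of the not-yet-seen elements
lemma foldl_apxIns_eq_nub (xs : List Int) : ∀ (acc : List Int),
    xs.foldl apxIns acc = acc ++ apxNub (xs.filter (fun y => y ∉ acc)) := by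
  induction xs with
  | nil => intro acc; simp [apxNub_nil]
  | cons x t ih =>
      intro acc
      by_cases h : x ∈ acc
      · simp only [List.foldl_cons, apxIns, List.filter_cons, h,
          not_true_eq_false, decide_false, if_true]
        simpa using ih acc
      · simp only [List.foldl_cons, apxIns, List.filter_cons, h,
          not_false_eq_true, decide_true, if_true, if_false]
        rw [ih (acc ++ [x]), apxNub_cons, List.filter_filter]
        have hp : ∀ y : Int, (decide (y ≠ x) && decide (y ∉ acc))
            = decide (y ∉ acc ++ [x]) := by
          intro y
          by_cases h1 : y = x <;> by_cases h2 : y ∈ acc <;>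
            simp [h1, h2, List.mem_append]
        simp only [hp]
        simp

theorem alternatingPositionCrossover_spec_aux (numberOfCities : Int) (parentOne : List Int) (parentTwo : List Int) :
    alternatingPositionCrossover numberOfCities parentOne parentTwo
      = alternatingPositionCrossover_alt numberOfCities parentOne parentTwo := by
  simp only [alternatingPositionCrossover, alternatingPositionCrossover_alt]
  set js := PySem.List.pyRange 0 numberOfCities 1 with hjs
  set g1 : Int → Int := fun j => PySem.List.pyGetD parentOne j 0 with hg1
  set g2 : Int → Int := fun j => PySem.List.pyGetD parentTwo j 0 with hg2
  -- A's first loop: two independent append-folds, i.e. two flatMaps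
  rw [PySem.List.foldl_prod_mk (f := fun s1 j => s1 ++ [g1 j, g2 j])
        (g := fun s2 j => s2 ++ [g2 j, g1 j])]
  rw [PySem.List.foldl_append_eq_flatMap (g := fun j => [g1 j, g2 j]),
      PySem.List.foldl_append_eq_flatMap (g := fun j => [g2 j, g1 j])]
  simp only [List.nil_append]
  -- A's second loop: two independent index-folds over the interleaved lists
  rw [PySem.List.foldl_prod_mk
        (f := fun (c : List Int) city => if (PySem.List.pyGetD (js.flatMap (fun j => [g1 j, g2 j])) city 0) ∈ c then c else c ++ [PySem.List.pyGetD (js.flatMap (fun j => [g1 j, g2 j])) city 0])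
        (g := fun (c : List Int) city => if (PySem.List.pyGetD (js.flatMap (fun j => [g2 j, g1 j])) city 0) ∈ c then c else c ++ [PySem.List.pyGetD (js.flatMap (fun j => [g2 j, g1 j])) city 0])]
  -- turn each index loop into a fold over the list itself
  rw [show PySem.List.len (js.flatMap (fun j => [g1 j, g2 j]))
        = PySem.List.len (js.flatMap (fun j => [g2 j, g1 j])) from by
      simp [PySem.List.len_eq]]
  rw [PySem.List.foldl_pyRange_zero_pyGetD (js.flatMap (fun j => [g2 j, g1 j])) 0
        (fun (c : List Int) x => if x ∈ c then c else c ++ [x]) []]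
  rw [show PySem.List.len (js.flatMap (fun j => [g2 j, g1 j]))
        = PySem.List.len (js.flatMap (fun j => [g1 j, g2 j])) from by
      simp [PySem.List.len_eq]]
  rw [PySem.List.foldl_pyRange_zero_pyGetD (js.flatMap (fun j => [g1 j, g2 j])) 0
        (fun (c : List Int) x => if x ∈ c then c else c ++ [x]) []]
  -- each dedup fold from the empty accumulator is the filter-based nub
  have hf : ∀ xs : List Int,
      xs.foldl (fun c x => if x ∈ c then c else c ++ [x]) [] = apxNub xs := by
    intro xs
    have := foldl_apxIns_eq_nub xs []
    simpa [apxIns] using this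
  rw [hf, hf, apxNubGo_eq, apxNubGo_eq]
  simp only [List.nil_append]
  exact rfl

-- ===== VERDICT (by name: the statement is the Claim_ definition above) =====
theorem alternatingPositionCrossover_spec : Claim_equal_alternatingPositionCrossover := by
  intro numberOfCities parentOne parentTwo _ _
  exact alternatingPositionCrossover_spec_aux numberOfCities parentOne parentTwo
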